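-- pv_equiv track=rewrite | github.com/pi12138/note | Python/old/爬虫/爬虫学习02/4_Scrapy框架/py/circ/circ/spiders/jianguan.py | handle_content
-- ===== SOURCE A (Python) =====
-- def handle_content(content):
--     str_dict = {
--         '\r\n': '',
--         '\t': "",
--         '\xa0': "",
--         '\r': "",
--         '\n': "",
--     }
--
--     contents = ''.join(content)
--     for i in str_dict.keys():
--         contents = contents.replace(i, str_dict[i])
--
--     return contents
-- ===== SOURCE B (Python) =====
-- def handle_content(content):
--     contents = ''.join(content)
--     return ''.join(c for c in contents if c not in '\r\n\t\xa0')
-- ===== Notes on version B (the rewrite author's own statement) =====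
-- stated objective: simpler
-- what changed: Replaces the five sequential whole-string .replace() passes driven by a dict of removal keys with a single character-membership filter pass over the joined string (the '\r\n' substring removal is subsumed by removing '\r' and '\n' individually).
import Mathlib
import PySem

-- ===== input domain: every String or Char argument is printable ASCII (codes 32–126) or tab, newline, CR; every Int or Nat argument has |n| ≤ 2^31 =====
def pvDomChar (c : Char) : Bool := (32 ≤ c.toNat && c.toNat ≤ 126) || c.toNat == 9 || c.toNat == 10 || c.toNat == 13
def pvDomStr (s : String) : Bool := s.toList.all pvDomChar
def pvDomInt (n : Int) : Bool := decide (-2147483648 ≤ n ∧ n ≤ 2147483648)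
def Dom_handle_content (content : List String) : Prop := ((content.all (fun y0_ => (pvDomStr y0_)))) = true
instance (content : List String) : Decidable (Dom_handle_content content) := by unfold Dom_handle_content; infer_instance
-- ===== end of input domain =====

-- B joins the fragments and drops the unwanted characters in one membership-filter
-- pass instead of A's five sequential whole-string .replace() passes (simpler).

-- ===== PORT A =====
def handle_content (content : List String) : String :=
  let str_dict : PySem.Dict String String :=
    PySem.Dict.ofList [("\r\n", ""), ("\t", ""), ("\u00a0", ""), ("\r", ""), ("\n", "")]
  let contents := PySem.Str.join "" content
  str_dict.keys.foldl (fun contents i => PySem.Str.replace contents i (str_dict.getD i "")) contents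

-- ===== PORT B =====
def handle_content_alt (content : List String) : String :=
  let contents := PySem.Str.join "" content
  String.ofList (contents.toList.filter (fun c => !(['\r', '\n', '\t', '\u00a0'].contains c)))

-- ===== PRECONDITION & SPEC =====
def Spec_handle_content (content : List String) (out : String) : Prop := out = handle_content_alt content
instance (content : List String) (out : String) : Decidable (Spec_handle_content content out) := by unfold Spec_handle_content; infer_instance

-- ===== CLAIM (what is proved, stated in full; the proofs are below) =====
def Claim_equal_handle_content : Prop := ∀ (content : List String), Dom_handle_content content → Spec_handle_content content (handle_content content)

-- ===== LEMMAS AND PROOFS =====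

-- replacing a single character by "" is exactly filtering that character out
theorem replace_go_single (a : Char) :
    ∀ (l : List Char) (fuel : Nat) (acc : List Char), l.length ≤ fuel →
      PySem.Chars.replace.go [a] [] fuel l acc = acc.reverse ++ l.filter (fun c => c ≠ a) := by
  intro l
  induction l with
  | nil =>
      intro fuel acc _
      cases fuel <;> simp [PySem.Chars.replace.go]
  | cons c t ih =>
      intro fuel acc hlen
      cases fuel with
      | zero => simp at hlen
      | succ f =>
        rw [PySem.Chars.replace.go]
        by_cases hac : a = c
        · subst hac
          have hpre : List.isPrefixOf [a] (a :: t) = true := by simp [List.isPrefixOf]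
          rw [if_pos hpre]
          have hdrop : List.drop [a].length (a :: t) = t := rfl
          rw [hdrop, List.reverse_nil, List.nil_append,
            ih _ acc (by simpa using Nat.le_of_succ_le_succ hlen)]
          simp
        · have hpre : List.isPrefixOf [a] (c :: t) = false := by
            simp [List.isPrefixOf]
            exact fun h => absurd h hac
          rw [hpre]
          simp only [if_neg Bool.false_ne_true]
          rw [ih _ (c :: acc) (by simpa using Nat.le_of_succ_le_succ hlen)]
          simp [List.filter_cons]
          intro h; exact absurd h.symm hac

theorem replace_single (a : Char) (l : List Char) :
    PySem.Chars.replace l [a] [] = l.filter (fun c => c ≠ a) := by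
  rw [PySem.Chars.replace]
  simp only [List.isEmpty_cons, if_neg Bool.false_ne_true]
  simpa using replace_go_single a l l.length [] le_rfl

-- a filter that kills every character of the pattern does not see a replace-by-"" of that pattern
theorem filter_replace_go (pat : List Char) (q : Char → Bool)
    (hpat : pat ≠ []) (hq : ∀ c ∈ pat, q c = false) :
    ∀ (fuel : Nat) (l : List Char) (acc : List Char), l.length ≤ fuel →
      (PySem.Chars.replace.go pat [] fuel l acc).filter q = acc.reverse.filter q ++ l.filter q := by
  intro fuel
  induction fuel with
  | zero =>
      intro l acc hlen
      rw [PySem.Chars.replace.go]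
      simp [List.filter_append]
  | succ f ih =>
      intro l acc hlen
      cases l with
      | nil =>
          rw [PySem.Chars.replace.go]
          simp
          omega
      | cons c t =>
        rw [PySem.Chars.replace.go]
        by_cases hpre : List.isPrefixOf pat (c :: t) = true
        · rw [if_pos hpre]
          have hp : pat <+: (c :: t) := by
            exact List.isPrefixOf_iff_prefix.mp hpre
          have hdroplen : ((c :: t).drop pat.length).length ≤ f := by
            have h1 : 1 ≤ pat.length := by
              cases pat with
              | nil => exact absurd rfl hpat
              | cons _ _ => simp
            simp only [List.length_drop]
            omega
          rw [ih _ _ hdroplen]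
          obtain ⟨r, hr⟩ := hp
          have hdrop : (c :: t).drop pat.length = r := by
            rw [← hr, List.drop_left]
          have hfil : (c :: t).filter q = r.filter q := by
            rw [← hr, List.filter_append,
              List.filter_eq_nil_iff.mpr (by intro x hx; simp [hq x hx])]
            simp
          rw [hdrop, hfil]
          simp
        · rw [if_neg hpre]
          rw [ih _ _ (by simpa using Nat.le_of_succ_le_succ hlen)]
          cases hqc : q c <;> simp [hqc]

theorem filter_replace (pat : List Char) (q : Char → Bool) (l : List Char)
    (hpat : pat ≠ []) (hq : ∀ c ∈ pat, q c = false) :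
    (PySem.Chars.replace l pat []).filter q = l.filter q := by
  rw [PySem.Chars.replace]
  rw [if_neg (by simpa [List.isEmpty_iff] using hpat)]
  simpa using filter_replace_go pat q hpat hq l.length l [] le_rfl

-- the whole A-side replace chain equals B's one-pass filter, on every List Char
theorem chain_eq (cs : List Char) :
    PySem.Chars.replace (PySem.Chars.replace (PySem.Chars.replace (PySem.Chars.replace
      (PySem.Chars.replace cs ['\r', '\n'] []) ['\t'] []) ['\u00a0'] []) ['\r'] []) ['\n'] []
    = cs.filter (fun c => !(['\r', '\n', '\t', '\u00a0'].contains c)) := by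
  rw [replace_single, replace_single, replace_single, replace_single]
  rw [List.filter_filter, List.filter_filter, List.filter_filter]
  rw [filter_replace _ _ _ (by simp) (by intro c hc; fin_cases hc <;> decide)]
  apply List.filter_congr
  intro c _
  by_cases h1 : c = '\r' <;> by_cases h2 : c = '\n' <;> by_cases h3 : c = '\t' <;>
    by_cases h4 : c = '\u00a0' <;> simp [h1, h2, h3, h4]

-- ===== VERDICT (by name: the statement is the Claim_ definition above) =====
theorem handle_content_spec : Claim_equal_handle_content := by
  intro content _
  unfold Spec_handle_content
  have hkeys : (PySem.Dict.ofList [("\r\n", ""), ("\t", ""), ("\u00a0", ""), ("\r", ""), ("\n", "")]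
      : PySem.Dict String String).keys = ["\r\n", "\t", "\u00a0", "\r", "\n"] := by decide
  have hgd : ∀ k ∈ ["\r\n", "\t", "\u00a0", "\r", "\n"],
      ((PySem.Dict.ofList [("\r\n", ""), ("\t", ""), ("\u00a0", ""), ("\r", ""), ("\n", "")]
      : PySem.Dict String String).getD k "") = "" := by decide
  have hgd1 := hgd "\r\n" (by simp)
  have hgd2 := hgd "\t" (by simp)
  have hgd3 := hgd "\u00a0" (by simp)
  have hgd4 := hgd "\r" (by simp)
  have hgd5 := hgd "\n" (by simp)
  apply String.toList_inj.mp
  simp only [handle_content, handle_content_alt, hkeys, hgd1, hgd2, hgd3, hgd4, hgd5, List.foldl,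
    PySem.Str.toList_replace, String.toList_ofList]
  have h1 : ("\r\n" : String).toList = ['\r', '\n'] := rfl
  have h2 : ("\t" : String).toList = ['\t'] := rfl
  have h3 : ("\u00a0" : String).toList = ['\u00a0'] := rfl
  have h4 : ("\r" : String).toList = ['\r'] := rfl
  have h5 : ("\n" : String).toList = ['\n'] := rfl
  have h6 : ("" : String).toList = [] := rfl
  rw [h1, h2, h3, h4, h5, h6]
  exact chain_eq _
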